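-- pv_equiv track=rewrite | github.com/thecallmeBilalAshiq/T20DSAChallenge | task3.py | max_removed_potholes
-- ===== SOURCE A (Python) =====
-- def max_removed_potholes(n, s0, s1):
--     # Convert to weights: w[r][i]=1 if s_r[i]=='X', else 0
--     w0 = [1 if c == 'X' else 0 for c in s0]
--     w1 = [1 if c == 'X' else 0 for c in s1]
--
--     # 1) Best single‐segment on each road via Kadane’s algorithm
--     def kadane(w):
--         best_end = best_all = 0
--         for x in w:
--             best_end = max(best_end + x, x)
--             best_all = max(best_all, best_end)
--         return best_all
--
--     best0 = kadane(w0)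
--     best1 = kadane(w1)
--
--     # 2) Build prefix‐max arrays
--     #    prefix0[i] = best subarray sum of w0 in [0..i]
--     #    prefix1[i] = best subarray sum of w1 in [0..i]
--     prefix0 = [0] * n
--     prefix1 = [0] * n
--     cur0 = cur1 = 0
--     for i in range(n):
--         cur0 = max(cur0 + w0[i], w0[i])
--         prefix0[i] = cur0 if i == 0 else max(prefix0[i-1], cur0)
--         cur1 = max(cur1 + w1[i], w1[i])
--         prefix1[i] = cur1 if i == 0 else max(prefix1[i-1], cur1)
--
--     # 3) Build suffix‐max arrays
--     #    suffix0[i] = best subarray sum of w0 in [i..n-1]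
--     #    suffix1[i] = best subarray sum of w1 in [i..n-1]
--     suffix0 = [0] * n
--     suffix1 = [0] * n
--     cur0 = cur1 = 0
--     for i in range(n-1, -1, -1):
--         cur0 = max(cur0 + w0[i], w0[i])
--         suffix0[i] = cur0 if i == n-1 else max(suffix0[i+1], cur0)
--         cur1 = max(cur1 + w1[i], w1[i])
--         suffix1[i] = cur1 if i == n-1 else max(suffix1[i+1], cur1)
--
--     # 4) Best “two‐segment” configuration
--     #    We pick a gap column j (1 <= j <= n-2) where we switch roads,
--     #    so we can have one segment entirely left of j on one road
--     #    and one segment entirely right of j on the other.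
--     best_two = 0
--     for j in range(1, n-1):
--         # prefix on road0 + suffix on road1, or vice versa
--         best_two = max(best_two,
--                        prefix0[j-1] + suffix1[j+1],
--                        prefix1[j-1] + suffix0[j+1])
--
--     # Answer is the best of: do nothing (0), one‐segment on either road, or two‐segments
--     return max(0, best0, best1, best_two)
-- ===== SOURCE B (Python) =====
-- def max_removed_potholes(n, s0, s1):
--     # Weights are 0/1 (never negative), so the best subarray of any window is
--     # simply its X-count: Kadane, the prefix/suffix max arrays and the gap scan
--     # all collapse to plain counting with a sliding split.
--     best = max(0,
--                sum(1 for c in s0 if c == 'X'),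
--                sum(1 for c in s1 if c == 'X'))
--     if n >= 3:
--         t0 = sum(1 for c in s0[:n] if c == 'X')
--         t1 = sum(1 for c in s1[:n] if c == 'X')
--         l0 = l1 = 0                       # X-count of s[:j-1] (before update)
--         m0 = 1 if s0[0] == 'X' else 0     # X-count of s[:j]   (before update)
--         m1 = 1 if s1[0] == 'X' else 0
--         for j in range(1, n - 1):
--             l0 += 1 if s0[j - 1] == 'X' else 0
--             l1 += 1 if s1[j - 1] == 'X' else 0
--             m0 += 1 if s0[j] == 'X' else 0
--             m1 += 1 if s1[j] == 'X' else 0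
--             best = max(best, l0 + t1 - m1, l1 + t0 - m0)
--     return best
-- ===== Notes on version B (the rewrite author's own statement) =====
-- stated objective: faster
-- what changed: Since the weights are 0/1 (never negative), the best subarray of any window is just its X-count, so B drops Kadane and the prefix/suffix max arrays entirely: it counts X's per road and runs one sliding-split pass over four running integer counts, combining left-count and (total minus left-count) across roads at each gap.
import Mathlib
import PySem

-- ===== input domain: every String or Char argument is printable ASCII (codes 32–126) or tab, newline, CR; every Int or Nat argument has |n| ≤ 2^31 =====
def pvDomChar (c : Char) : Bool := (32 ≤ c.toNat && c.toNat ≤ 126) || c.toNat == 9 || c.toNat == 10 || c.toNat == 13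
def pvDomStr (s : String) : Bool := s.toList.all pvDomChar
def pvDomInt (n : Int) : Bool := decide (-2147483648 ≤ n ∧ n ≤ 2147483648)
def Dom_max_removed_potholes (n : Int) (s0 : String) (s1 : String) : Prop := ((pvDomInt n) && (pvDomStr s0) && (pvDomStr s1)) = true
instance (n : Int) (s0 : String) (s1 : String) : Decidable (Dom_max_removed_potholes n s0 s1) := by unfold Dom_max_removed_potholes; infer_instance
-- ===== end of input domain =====

-- B replaces A's algorithm: the weights are 0/1 (never negative), so every best-subarray
-- quantity A computes with Kadane and prefix/suffix max arrays is just an X-count; B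
-- counts X's per road and runs one sliding-split pass over four running counts.
-- Equivalence is proved wherever A returns (n ≤ both lengths).

-- ===== PORT A =====
def pvWeights (s : String) : List Int :=
  s.toList.map (fun c => if c = 'X' then (1 : Int) else 0)

def pvKadane (w : List Int) : Int :=
  (w.foldl (fun st x =>
      let be := max (st.1 + x) x
      (be, max st.2 be)) ((0 : Int), (0 : Int))).2

-- prefix loop of A: the array cells are written in order i = 0..n-1, so the array is
-- built by appending; the read prefix[i-1] is a read of the list built so far.
def pvPrefStepA (w0 w1 : List Int) (st : Int × Int × List Int × List Int) (i : Int) :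
    Int × Int × List Int × List Int :=
  let x0 := PySem.List.pyGetD w0 i 0
  let cur0 := max (st.1 + x0) x0
  let p0 := st.2.2.1 ++ [if i = 0 then cur0 else max (PySem.List.pyGetD st.2.2.1 (i - 1) 0) cur0]
  let x1 := PySem.List.pyGetD w1 i 0
  let cur1 := max (st.2.1 + x1) x1
  let p1 := st.2.2.2 ++ [if i = 0 then cur1 else max (PySem.List.pyGetD st.2.2.2 (i - 1) 0) cur1]
  (cur0, cur1, p0, p1)

-- suffix loop of A: cells are written in order i = n-1..0, so the array is built by
-- prepending; the read suffix[i+1] is position 0 of the segment built so far.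
def pvSufStepA (n : Int) (w0 w1 : List Int) (st : Int × Int × List Int × List Int) (i : Int) :
    Int × Int × List Int × List Int :=
  let x0 := PySem.List.pyGetD w0 i 0
  let cur0 := max (st.1 + x0) x0
  let s0 := (if i = n - 1 then cur0 else max (PySem.List.pyGetD st.2.2.1 0 0) cur0) :: st.2.2.1
  let x1 := PySem.List.pyGetD w1 i 0
  let cur1 := max (st.2.1 + x1) x1
  let s1 := (if i = n - 1 then cur1 else max (PySem.List.pyGetD st.2.2.2 0 0) cur1) :: st.2.2.2
  (cur0, cur1, s0, s1)

def max_removed_potholes (n : Int) (s0 : String) (s1 : String) : Int :=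
  let w0 := pvWeights s0
  let w1 := pvWeights s1
  let best0 := pvKadane w0
  let best1 := pvKadane w1
  let pre := (PySem.List.pyRange 0 n 1).foldl (pvPrefStepA w0 w1) (0, 0, [], [])
  let suf := (PySem.List.pyRange (n - 1) (-1) (-1)).foldl (pvSufStepA n w0 w1) (0, 0, [], [])
  let best_two := (PySem.List.pyRange 1 (n - 1) 1).foldl (fun bt j =>
      max (max bt (PySem.List.pyGetD pre.2.2.1 (j - 1) 0 + PySem.List.pyGetD suf.2.2.2 (j + 1) 0))
          (PySem.List.pyGetD pre.2.2.2 (j - 1) 0 + PySem.List.pyGetD suf.2.2.1 (j + 1) 0)) 0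
  max (max (max 0 best0) best1) best_two

-- ===== PORT B =====
-- "1 if s[j] == 'X' else 0" (indices used are always in range under Pre_)
def pvIsX (s : String) (j : Int) : Int :=
  if PySem.Str.pyGet? s j = some 'X' then 1 else 0

-- "sum(1 for c in cs if c == 'X')"
def pvCountX (cs : List Char) : Int :=
  (cs.map (fun c => if c = 'X' then (1 : Int) else 0)).sum

-- sliding-split state: (l0, l1, m0, m1, best)
def pvSlideStep (s0 s1 : String) (t0 t1 : Int) (st : Int × Int × Int × Int × Int) (j : Int) :
    Int × Int × Int × Int × Int :=
  let l0 := st.1 + pvIsX s0 (j - 1)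
  let l1 := st.2.1 + pvIsX s1 (j - 1)
  let m0 := st.2.2.1 + pvIsX s0 j
  let m1 := st.2.2.2.1 + pvIsX s1 j
  (l0, l1, m0, m1, max (max st.2.2.2.2 (l0 + t1 - m1)) (l1 + t0 - m0))

def max_removed_potholes_alt (n : Int) (s0 : String) (s1 : String) : Int :=
  let best := max (max 0 (pvCountX s0.toList)) (pvCountX s1.toList)
  if 3 ≤ n then
    let t0 := pvCountX (PySem.List.slice s0.toList none (some n))
    let t1 := pvCountX (PySem.List.slice s1.toList none (some n))
    ((PySem.List.pyRange 1 (n - 1) 1).foldl (pvSlideStep s0 s1 t0 t1)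
        (0, 0, pvIsX s0 0, pvIsX s1 0, best)).2.2.2.2
  else best

-- ===== PRECONDITION & SPEC =====
-- Pre_ excludes exactly the inputs where A raises IndexError: n larger than a string
-- length (the loops then index past the end of a road).
def Pre_max_removed_potholes (n : Int) (s0 : String) (s1 : String) : Prop :=
  n ≤ PySem.Str.len s0 ∧ n ≤ PySem.Str.len s1
instance (n : Int) (s0 : String) (s1 : String) : Decidable (Pre_max_removed_potholes n s0 s1) := by
  unfold Pre_max_removed_potholes; infer_instance

def pvWitness_max_removed_potholes : Int × String × String := (4, "X.XX", ".XX.")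

def Spec_max_removed_potholes (n : Int) (s0 : String) (s1 : String) (out : Int) : Prop := out = max_removed_potholes_alt n s0 s1
instance (n : Int) (s0 : String) (s1 : String) (out : Int) : Decidable (Spec_max_removed_potholes n s0 s1 out) := by unfold Spec_max_removed_potholes; infer_instance

-- ===== CLAIM (what is proved, stated in full; the proofs are below) =====
def Claim_equal_max_removed_potholes : Prop := ∀ (n : Int) (s0 : String) (s1 : String), Dom_max_removed_potholes n s0 s1 → Pre_max_removed_potholes n s0 s1 → Spec_max_removed_potholes n s0 s1 (max_removed_potholes n s0 s1)

-- ===== LEMMAS AND PROOFS =====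

-- Kadane step and the fold from (0,0); P w k / S w k are the prefix-best over w[0..k]
-- and the suffix-best over w[k..].
def kstep (st : Int × Int) (x : Int) : Int × Int :=
  let be := max (st.1 + x) x
  (be, max st.2 be)

def fk (l : List Int) : Int × Int := l.foldl kstep (0, 0)

def pvP (w : List Int) (k : Nat) : Int := (fk (w.take (k + 1))).2

def pvS (w : List Int) (k : Nat) : Int := (fk ((w.drop k).reverse)).2

def pvH (w0 w1 : List Int) (j : Int) : Int :=
  max (pvP w0 (j - 1).toNat + pvS w1 (j + 1).toNat)
      (pvP w1 (j - 1).toNat + pvS w0 (j + 1).toNat)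

-- fk of one more element on the right is one Kadane step.
lemma fk_append (l : List Int) (x : Int) : fk (l ++ [x]) = kstep (fk l) x := by
  simp [fk, List.foldl_append]

-- on a nonnegative list the Kadane fold is just the running total and its max
lemma foldl_kstep_nonneg (l : List Int) (h : ∀ x ∈ l, 0 ≤ x) :
    ∀ a b : Int, 0 ≤ a →
      l.foldl kstep (a, b) = if l = [] then (a, b) else (a + l.sum, max b (a + l.sum)) := by
  induction l with
  | nil => intro a b _; simp
  | cons x t ih =>
    intro a b ha
    have hx : (0:Int) ≤ x := h x (List.mem_cons_self)
    have ht : ∀ y ∈ t, (0:Int) ≤ y := fun y hy => h y (List.mem_cons_of_mem _ hy)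
    have hts : (0:Int) ≤ t.sum := List.sum_nonneg ht
    simp only [List.foldl_cons, kstep, max_eq_left (by omega : x ≤ a + x)]
    rw [ih ht (a + x) (max b (a + x)) (by omega)]
    rcases eq_or_ne t [] with rfl | hne
    · simp
    · simp only [if_neg hne, List.sum_cons, if_neg (List.cons_ne_nil x t)]
      refine Prod.ext (by ring_nf) ?_
      simp only
      omega

-- hence fk = (sum, sum) on a nonnegative list
lemma fk_nonneg (l : List Int) (h : ∀ x ∈ l, 0 ≤ x) : (fk l).2 = l.sum := by
  rw [fk, foldl_kstep_nonneg l h 0 0 le_rfl]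
  rcases eq_or_ne l [] with rfl | hne
  · simp
  · have : (0:Int) ≤ l.sum := List.sum_nonneg h
    simp only [if_neg hne]
    omega

lemma pvP_eq_sum (w : List Int) (h : ∀ x ∈ w, 0 ≤ x) (k : Nat) :
    pvP w k = (w.take (k + 1)).sum :=
  fk_nonneg _ (fun x hx => h x (List.mem_of_mem_take hx))

lemma pvS_eq_sum (w : List Int) (h : ∀ x ∈ w, 0 ≤ x) (k : Nat) :
    pvS w k = (w.drop k).sum := by
  rw [pvS, fk_nonneg _ (fun x hx => h x (List.mem_of_mem_drop (List.mem_reverse.mp hx))),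
      List.sum_reverse]

-- the forward loop of A: state after processing columns 0..k-1
lemma fwdA (w0 w1 : List Int) (h0 : ∀ x ∈ w0, 0 ≤ x) (h1 : ∀ x ∈ w1, 0 ≤ x) :
    ∀ k : Nat, k ≤ w0.length → k ≤ w1.length →
    (PySem.List.pyRange 0 (k : Int) 1).foldl (pvPrefStepA w0 w1) (0, 0, [], []) =
      ((fk (w0.take k)).1, (fk (w1.take k)).1,
       (List.range k).map (pvP w0), (List.range k).map (pvP w1)) := by
  intro k
  induction k with
  | zero => intro _ _; simp [PySem.List.pyRange_one_eq_nil, fk]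
  | succ k ih =>
    intro hk0 hk1
    have hk0' : k < w0.length := by omega
    have hk1' : k < w1.length := by omega
    have hcast : ((k + 1 : Nat) : Int) = (k : Int) + 1 := by push_cast; ring
    rw [hcast, PySem.List.pyRange_one_succ_right (by positivity), List.foldl_append,
        ih (by omega) (by omega)]
    simp only [List.foldl_cons, List.foldl_nil]
    have hget0 : PySem.List.pyGetD w0 (k : Int) 0 = w0[k] := by
      rw [PySem.List.pyGetD_natCast, List.getD_eq_getElem _ _ hk0']
    have hget1 : PySem.List.pyGetD w1 (k : Int) 0 = w1[k] := by
      rw [PySem.List.pyGetD_natCast, List.getD_eq_getElem _ _ hk1']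
    have htake0 : w0.take (k + 1) = w0.take k ++ [w0[k]] := List.take_succ_eq_append_getElem hk0'
    have htake1 : w1.take (k + 1) = w1.take k ++ [w1[k]] := List.take_succ_eq_append_getElem hk1'
    rcases Nat.eq_zero_or_pos k with hk | hk
    · subst hk
      simp only [pvPrefStepA, hget0, hget1]
      norm_num
      constructor
      · simp [htake0, fk, kstep]
      constructor
      · simp [htake1, fk, kstep]
      constructor
      · simp only [pvP, htake0, fk_append, kstep]
        have : (0:Int) ≤ w0[0] := h0 _ (List.getElem_mem hk0')
        simp [fk]
        omega
      · simp only [pvP, htake1, fk_append, kstep]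
        have : (0:Int) ≤ w1[0] := h1 _ (List.getElem_mem hk1')
        simp [fk]
        omega
    · have hkne : (k : Int) ≠ 0 := by omega
      have hkm : ((k : Int) - 1) = ((k - 1 : Nat) : Int) := by omega
      simp only [pvPrefStepA, hget0, hget1, if_neg hkne, hkm, PySem.List.pyGetD_natCast]
      have hgd : ∀ w : List Int, ((List.range k).map (pvP w)).getD (k-1) 0 = pvP w (k-1) := by
        intro w
        rw [List.getD_eq_getElem _ _ (by simp; omega)]
        simp [List.getElem_map, List.getElem_range]
      have hPstep : ∀ w : List Int, ∀ h : k < w.length,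
          pvP w k = max (pvP w (k-1)) (max ((fk (w.take k)).1 + w[k]) w[k]) := by
        intro w h
        have : w.take (k+1) = w.take k ++ [w[k]] := List.take_succ_eq_append_getElem h
        have htk : w.take ((k-1)+1) = w.take k := by congr 1; omega
        simp only [pvP, this, fk_append, kstep, htk]
      refine Prod.ext ?_ (Prod.ext ?_ (Prod.ext ?_ ?_)) <;>
        simp only [htake0, htake1, fk_append, kstep, hgd, List.range_succ, List.map_append,
          List.map_cons, List.map_nil]
      · simp [hPstep w0 hk0']
      · simp [hPstep w1 hk1']

-- the suffix loop of A: peeling processed columns k, k-1, ..., 0 off the left of the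
-- countdown range; the accumulated segment holds pvS values for columns k..n-1.
lemma sufA (w0 w1 : List Int) (hlen : w1.length = w0.length)
    (h0 : ∀ x ∈ w0, 0 ≤ x) (h1 : ∀ x ∈ w1, 0 ≤ x) :
    ∀ k : Nat, k ≤ w0.length →
    (PySem.List.pyRange ((k : Int) - 1) (-1) (-1)).foldl
        (pvSufStepA (w0.length : Int) w0 w1)
        ((fk ((w0.drop k).reverse)).1, (fk ((w1.drop k).reverse)).1,
         (List.range (w0.length - k)).map (fun j => pvS w0 (k + j)),
         (List.range (w0.length - k)).map (fun j => pvS w1 (k + j)))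
      = ((fk w0.reverse).1, (fk w1.reverse).1,
         (List.range w0.length).map (pvS w0), (List.range w0.length).map (pvS w1)) := by
  intro k
  induction k with
  | zero =>
    intro _
    rw [PySem.List.pyRange_neg_one_eq_nil (by norm_num)]
    simp
  | succ k ih =>
    intro hk
    have hk0' : k < w0.length := by omega
    have hk1' : k < w1.length := by omega
    have hc : ((k + 1 : Nat) : Int) - 1 = (k : Int) := by push_cast; ring
    rw [hc, PySem.List.pyRange_neg_one_cons (by omega), List.foldl_cons]
    have hstate :
        pvSufStepA (w0.length : Int) w0 w1
          ((fk ((w0.drop (k+1)).reverse)).1, (fk ((w1.drop (k+1)).reverse)).1,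
           (List.range (w0.length - (k+1))).map (fun j => pvS w0 ((k+1) + j)),
           (List.range (w0.length - (k+1))).map (fun j => pvS w1 ((k+1) + j))) (k : Int)
        = ((fk ((w0.drop k).reverse)).1, (fk ((w1.drop k).reverse)).1,
           (List.range (w0.length - k)).map (fun j => pvS w0 (k + j)),
           (List.range (w0.length - k)).map (fun j => pvS w1 (k + j))) := by
      have hget0 : PySem.List.pyGetD w0 (k : Int) 0 = w0[k] := by
        rw [PySem.List.pyGetD_natCast, List.getD_eq_getElem _ _ hk0']
      have hget1 : PySem.List.pyGetD w1 (k : Int) 0 = w1[k] := by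
        rw [PySem.List.pyGetD_natCast, List.getD_eq_getElem _ _ hk1']
      have hx0 : (0:Int) ≤ w0[k] := h0 _ (List.getElem_mem hk0')
      have hx1 : (0:Int) ≤ w1[k] := h1 _ (List.getElem_mem hk1')
      have hdrop0 : (w0.drop k).reverse = (w0.drop (k+1)).reverse ++ [w0[k]] := by
        rw [List.drop_eq_getElem_cons hk0']; simp
      have hdrop1 : (w1.drop k).reverse = (w1.drop (k+1)).reverse ++ [w1[k]] := by
        rw [List.drop_eq_getElem_cons hk1']; simp
      rcases Nat.eq_or_lt_of_le hk with hkm | hkm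
      · -- k = length - 1: the "i == n-1" branch; the segment so far is empty
        have hklen : k = w0.length - 1 := by omega
        have hcond : (k : Int) = (w0.length : Int) - 1 := by omega
        have hdm0 : w0.drop (k+1) = [] := List.drop_of_length_le (by omega)
        have hdm1 : w1.drop (k+1) = [] := List.drop_of_length_le (by omega)
        have hr1 : w0.length - k = 1 := by omega
        have hr0 : w0.length - (k+1) = 0 := by omega
        simp only [pvSufStepA, hget0, hget1, if_pos hcond, hdm0, hdm1, hr0, hr1,
          List.range_zero, List.map_nil, List.range_one, List.map_cons, List.map_nil,
          List.reverse_nil]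
        refine Prod.ext ?_ (Prod.ext ?_ (Prod.ext ?_ ?_))
        · simp [hdrop0, hdm0, fk, kstep]
        · simp [hdrop1, hdm1, fk, kstep]
        · simp only [pvS, Nat.add_zero, hdrop0, hdm0, fk_append, kstep, List.reverse_nil]
          simp [fk]; omega
        · simp only [pvS, Nat.add_zero, hdrop1, hdm1, fk_append, kstep, List.reverse_nil]
          simp [fk]; omega
      · -- k < length - 1: the segment so far is nonempty, its head is pvS _ (k+1)
        have hcond : ¬ ((k : Int) = (w0.length : Int) - 1) := by omega
        have hseg : ∀ w : List Int, (List.range (w0.length - (k+1))).map (fun j => pvS w ((k+1) + j))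
            = pvS w (k+1) :: (List.range (w0.length - (k+2))).map (fun j => pvS w ((k+2) + j)) := by
          intro w
          have h1' : w0.length - (k+1) = (w0.length - (k+2)) + 1 := by omega
          rw [h1', List.range_succ_eq_map, List.map_cons, List.map_map]
          refine congrArg₂ _ (by norm_num) (List.map_congr_left ?_)
          intro j _; simp [Function.comp]; congr 1; omega
        have hsegk : ∀ w : List Int, (List.range (w0.length - k)).map (fun j => pvS w (k + j))
            = pvS w k :: (List.range (w0.length - (k+1))).map (fun j => pvS w ((k+1) + j)) := by
          intro w
          have h1' : w0.length - k = (w0.length - (k+1)) + 1 := by omega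
          rw [h1', List.range_succ_eq_map, List.map_cons, List.map_map]
          refine congrArg₂ _ (by norm_num) (List.map_congr_left ?_)
          intro j _; simp [Function.comp]; congr 1; omega
        simp only [pvSufStepA, hget0, hget1, if_neg hcond, hseg, hsegk]
        refine Prod.ext ?_ (Prod.ext ?_ (Prod.ext ?_ ?_))
        · simp [hdrop0, fk_append, kstep]
        · simp [hdrop1, fk_append, kstep]
        · simp only [PySem.List.pyGetD_zero, List.getD_cons_zero, List.cons.injEq]
          refine ⟨?_, trivial⟩
          simp only [pvS, hdrop0, fk_append, kstep]
        · simp only [PySem.List.pyGetD_zero, List.getD_cons_zero, List.cons.injEq]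
          refine ⟨?_, trivial⟩
          simp only [pvS, hdrop1, fk_append, kstep]
    rw [hstate, ih (by omega)]

-- max-fold over a list of candidate values: pulling a constant out
lemma foldl_max_pull (h : Int → Int) :
    ∀ (l : List Int) (a b : Int),
      l.foldl (fun acc j => max acc (h j)) (max a b) =
        max a (l.foldl (fun acc j => max acc (h j)) b) := by
  intro l
  induction l with
  | nil => intro a b; rfl
  | cons x t ih =>
    intro a b
    simp only [List.foldl_cons]
    rw [Int.max_assoc, ih]

-- the gap loop of A over the prefix/suffix lists is a running max of the pvH candidates
lemma gapA (w0 w1 : List Int) :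
    (PySem.List.pyRange 1 ((w0.length : Int) - 1) 1).foldl (fun bt j =>
        max (max bt (PySem.List.pyGetD ((List.range w0.length).map (pvP w0)) (j - 1) 0 +
                     PySem.List.pyGetD ((List.range w0.length).map (pvS w1)) (j + 1) 0))
            (PySem.List.pyGetD ((List.range w0.length).map (pvP w1)) (j - 1) 0 +
             PySem.List.pyGetD ((List.range w0.length).map (pvS w0)) (j + 1) 0)) 0
    = (PySem.List.pyRange 1 ((w0.length : Int) - 1) 1).foldl
        (fun acc j => max acc (pvH w0 w1 j)) 0 := by
  refine PySem.List.foldl_congr_mem _ _ _ _ ?_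
  intro acc j hj
  rw [PySem.List.mem_pyRange_one] at hj
  have hgP : ∀ w : List Int, PySem.List.pyGetD ((List.range w0.length).map (pvP w)) (j - 1) 0
      = pvP w (j - 1).toNat := by
    intro w
    rw [PySem.List.pyGetD_eq_getElem _ 0 (by omega) (by simp; omega)]
    simp
  have hgS : ∀ w : List Int, PySem.List.pyGetD ((List.range w0.length).map (pvS w)) (j + 1) 0
      = pvS w (j + 1).toNat := by
    intro w
    rw [PySem.List.pyGetD_eq_getElem _ 0 (by omega) (by simp; omega)]
    simp
  rw [hgP, hgP, hgS, hgS, pvH, Int.max_assoc]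

lemma fk_nil : fk [] = (0, 0) := rfl

-- reads below index k see only the first k elements
lemma pyGetD_take (w : List Int) (k : Nat) (hk : k ≤ w.length) (i : Int)
    (h0 : 0 ≤ i) (hi : i < (k : Int)) :
    PySem.List.pyGetD w i 0 = PySem.List.pyGetD (w.take k) i 0 := by
  rw [PySem.List.pyGetD_eq_getElem _ 0 h0 (by omega),
      PySem.List.pyGetD_eq_getElem _ 0 h0 (by simp; omega)]
  exact List.getElem_take.symm

-- B-side: the 0/1 test is a read of the weight list, and the running counts are
-- sums of take-prefixes of the weight lists.
lemma pvIsX_eq_getD (s : String) (j : Int) (hj : 0 ≤ j) :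
    pvIsX s j = PySem.List.pyGetD (pvWeights s) j 0 := by
  have hlen : (pvWeights s).length = s.toList.length := by simp [pvWeights]
  rw [pvIsX, PySem.Str.pyGet?_eq,
      show PySem.Chars.pyGet? s.toList j = PySem.List.pyGet? s.toList j from rfl,
      PySem.List.pyGet?_of_nonneg _ hj]
  rcases lt_or_ge j.toNat s.toList.length with hlt | hge
  · rw [List.getElem?_eq_getElem hlt,
        PySem.List.pyGetD_eq_getElem _ 0 hj (by rw [hlen]; omega)]
    simp [pvWeights]
  · rw [List.getElem?_eq_none hge, PySem.List.pyGetD_of_none _ _ _ ?_]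
    · simp
    · rw [PySem.List.pyGet?_eq_none_iff, hlen]
      simp only [PySem.Raise.InRange, not_and, not_lt]
      intro _
      omega

lemma sum_take_succ (w : List Int) (t : Nat) :
    (w.take (t + 1)).sum = (w.take t).sum + PySem.List.pyGetD w (t : Int) 0 := by
  rcases lt_or_ge t w.length with hlt | hge
  · rw [List.take_succ_eq_append_getElem hlt, List.sum_append,
        PySem.List.pyGetD_eq_getElem _ 0 (by omega) (by omega)]
    simp
  · rw [List.take_of_length_le (by omega), List.take_of_length_le hge,
        PySem.List.pyGetD_of_none]
    · simp
    · rw [PySem.List.pyGet?_eq_none_iff]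
      simp [PySem.Raise.InRange]; omega

-- the sliding loop of B: after processing j = 1..t the counts are prefix sums and the
-- best component is the running max of the two cross candidates
lemma slideB (s0 s1 : String) (t0 t1 : Int) (b : Int) :
    ∀ t : Nat,
    (PySem.List.pyRange 1 (1 + (t : Int)) 1).foldl (pvSlideStep s0 s1 t0 t1)
        (0, 0, pvIsX s0 0, pvIsX s1 0, b) =
      (((pvWeights s0).take t).sum, ((pvWeights s1).take t).sum,
       ((pvWeights s0).take (t + 1)).sum, ((pvWeights s1).take (t + 1)).sum,
       (PySem.List.pyRange 1 (1 + (t : Int)) 1).foldl (fun acc j =>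
         max (max acc (((pvWeights s0).take j.toNat).sum + t1 - ((pvWeights s1).take (j.toNat + 1)).sum))
             (((pvWeights s1).take j.toNat).sum + t0 - ((pvWeights s0).take (j.toNat + 1)).sum)) b) := by
  intro t
  induction t with
  | zero =>
    rw [PySem.List.pyRange_one_eq_nil (by norm_num)]
    simp only [List.foldl_nil, List.take_zero, List.sum_nil]
    refine Prod.ext ?_ (Prod.ext ?_ (Prod.ext ?_ (Prod.ext ?_ rfl))) <;> simp only
    · rw [pvIsX_eq_getD s0 0 le_rfl]
      have h := sum_take_succ (pvWeights s0) 0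
      simpa using h.symm
    · rw [pvIsX_eq_getD s1 0 le_rfl]
      have h := sum_take_succ (pvWeights s1) 0
      simpa using h.symm
  | succ t ih =>
    have hcast : (1 : Int) + ((t + 1 : Nat) : Int) = (1 + (t : Int)) + 1 := by push_cast; ring
    rw [hcast, PySem.List.pyRange_one_succ_right (by omega), List.foldl_append, ih,
        List.foldl_append]
    simp only [List.foldl_cons, List.foldl_nil]
    have e2 : ((1 : Int) + (t : Int)) = ((t + 1 : Nat) : Int) := by push_cast; ring
    have e3 : ((t + 1 : Nat) : Int).toNat = t + 1 := by omega
    have e1' : ((t + 1 : Nat) : Int) - 1 = ((t : Nat) : Int) := by push_cast; ring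
    simp only [pvSlideStep, e2, e1', e3]
    rw [pvIsX_eq_getD s0 _ (by positivity), pvIsX_eq_getD s1 _ (by positivity),
        pvIsX_eq_getD s0 ((t + 1 : Nat) : Int) (by positivity),
        pvIsX_eq_getD s1 ((t + 1 : Nat) : Int) (by positivity),
        sum_take_succ (pvWeights s0) (t + 1), sum_take_succ (pvWeights s1) (t + 1),
        sum_take_succ (pvWeights s0) t, sum_take_succ (pvWeights s1) t]

theorem max_removed_potholes_spec : Claim_equal_max_removed_potholes := by
  intro n s0 s1 _ hpre
  obtain ⟨hp0, hp1⟩ := hpre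
  unfold Spec_max_removed_potholes
  have hL0 : PySem.Str.len s0 = ((pvWeights s0).length : Int) := by
    rw [PySem.Str.len_eq]; simp [pvWeights]
  have hL1 : PySem.Str.len s1 = ((pvWeights s1).length : Int) := by
    rw [PySem.Str.len_eq]; simp [pvWeights]
  have hnn : ∀ s : String, ∀ x ∈ pvWeights s, (0:Int) ≤ x := by
    intro s x hx
    simp only [pvWeights, List.mem_map] at hx
    obtain ⟨c, -, rfl⟩ := hx; split <;> norm_num
  have hkadA : ∀ w : List Int, pvKadane w = (fk w).2 := fun _ => rfl
  have hcnt : ∀ s : String, pvCountX s.toList = (pvWeights s).sum := fun _ => rfl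
  simp only [max_removed_potholes, max_removed_potholes_alt, hkadA, hcnt]
  rcases lt_or_ge n 3 with hn3 | hn3
  · -- n < 3: A's gap loop is empty and B takes the else branch
    rw [if_neg (by omega), PySem.List.pyRange_one_eq_nil (show n - 1 ≤ 1 by omega)]
    simp only [List.foldl_nil]
    rw [fk_nonneg _ (hnn s0), fk_nonneg _ (hnn s1)]
    generalize (pvWeights s0).sum = a
    generalize (pvWeights s1).sum = b
    omega
  · -- 3 ≤ n
    obtain ⟨k, rfl⟩ : ∃ k : Nat, n = (k : Nat) := ⟨n.toNat, by omega⟩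
    have hk3 : 3 ≤ k := by omega
    have hk0 : k ≤ (pvWeights s0).length := by omega
    have hk1 : k ≤ (pvWeights s1).length := by omega
    have hkl0 : k ≤ s0.toList.length := by simpa [pvWeights] using hk0
    have hkl1 : k ≤ s1.toList.length := by simpa [pvWeights] using hk1
    rw [if_pos hn3]
    -- B's totals are sums of the first k weights
    have hslice : ∀ s : String, pvCountX (PySem.List.slice s.toList none (some (k : Int)))
        = ((pvWeights s).take k).sum := by
      intro s
      rw [PySem.List.slice_to (xs := s.toList) (b := (k : Int)) (by positivity), pvCountX]
      have ht : ((k : Int)).toNat = k := by omega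
      rw [ht, List.map_take]
      rfl
    rw [hslice s0, hslice s1]
    -- B's sliding loop is a running max of the cross candidates
    have hr : (k : Int) - 1 = 1 + ((k - 2 : Nat) : Int) := by omega
    rw [hr, slideB]
    simp only []
    -- pointwise, each candidate is pvH of the take-k weight lists
    have hcand :
        (PySem.List.pyRange 1 (1 + ((k - 2 : Nat) : Int)) 1).foldl (fun acc j =>
          max (max acc (((pvWeights s0).take j.toNat).sum + ((pvWeights s1).take k).sum
                  - ((pvWeights s1).take (j.toNat + 1)).sum))
              (((pvWeights s1).take j.toNat).sum + ((pvWeights s0).take k).sum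
                  - ((pvWeights s0).take (j.toNat + 1)).sum))
          (max (max 0 (pvWeights s0).sum) (pvWeights s1).sum)
        = (PySem.List.pyRange 1 (1 + ((k - 2 : Nat) : Int)) 1).foldl (fun acc j =>
            max acc (pvH ((pvWeights s0).take k) ((pvWeights s1).take k) j))
          (max (max 0 (pvWeights s0).sum) (pvWeights s1).sum) := by
      refine PySem.List.foldl_congr_mem _ _ _ _ ?_
      intro acc j hj
      rw [PySem.List.mem_pyRange_one] at hj
      have hj1 : 1 ≤ j := hj.1
      have hjk : j < (k : Int) - 1 := by omega
      have hnn0 : ∀ x ∈ (pvWeights s0).take k, (0:Int) ≤ x :=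
        fun x hx => hnn s0 x (List.mem_of_mem_take hx)
      have hnn1 : ∀ x ∈ (pvWeights s1).take k, (0:Int) ≤ x :=
        fun x hx => hnn s1 x (List.mem_of_mem_take hx)
      have htt : ∀ w : List Int, ∀ m : Nat, (w.take k).take m = w.take (min m k) :=
        fun w m => List.take_take
      have hP : ∀ s : String, pvP ((pvWeights s).take k) (j - 1).toNat
          = ((pvWeights s).take j.toNat).sum := by
        intro s
        rw [pvP_eq_sum _ (fun x hx => hnn s x (List.mem_of_mem_take hx)), htt]
        have hmin : min ((j - 1).toNat + 1) k = j.toNat := by omega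
        rw [hmin]
      have hS : ∀ s : String, pvS ((pvWeights s).take k) (j + 1).toNat
          = ((pvWeights s).take k).sum - ((pvWeights s).take (j.toNat + 1)).sum := by
        intro s
        rw [pvS_eq_sum _ (fun x hx => hnn s x (List.mem_of_mem_take hx))]
        have := List.sum_take_add_sum_drop ((pvWeights s).take k) (j + 1).toNat
        rw [htt] at this
        have hm : min (j + 1).toNat k = j.toNat + 1 := by omega
        rw [hm] at this
        omega
      rw [pvH, hP s0, hP s1, hS s0, hS s1, Int.max_assoc]
      congr 2 <;> ring
    rw [hcand]
    -- pull the nonnegative seed out of the running max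
    have hbest0 : (0:Int) ≤ max (max 0 (pvWeights s0).sum) (pvWeights s1).sum :=
      le_trans (le_max_left _ _) (le_max_left _ _)
    rw [show max (max 0 (pvWeights s0).sum) (pvWeights s1).sum
          = max (max (max 0 (pvWeights s0).sum) (pvWeights s1).sum) 0
          from (Int.max_eq_left hbest0).symm,
        foldl_max_pull]
    rw [← hr]
    -- now reduce A to the same expression: restrict its loops to the first k columns
    have hcP : (PySem.List.pyRange 0 (k : Int) 1).foldl
          (pvPrefStepA (pvWeights s0) (pvWeights s1)) (0, 0, [], [])
        = (PySem.List.pyRange 0 (k : Int) 1).foldl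
          (pvPrefStepA ((pvWeights s0).take k) ((pvWeights s1).take k)) (0, 0, [], []) := by
      refine PySem.List.foldl_congr_mem _ _ _ _ ?_
      intro acc i hi
      rw [PySem.List.mem_pyRange_one] at hi
      simp only [pvPrefStepA, pyGetD_take (pvWeights s0) k hk0 i hi.1 hi.2,
        pyGetD_take (pvWeights s1) k hk1 i hi.1 hi.2]
    have hcS : (PySem.List.pyRange ((k : Int) - 1) (-1) (-1)).foldl
          (pvSufStepA (k : Int) (pvWeights s0) (pvWeights s1)) (0, 0, [], [])
        = (PySem.List.pyRange ((k : Int) - 1) (-1) (-1)).foldl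
          (pvSufStepA (k : Int) ((pvWeights s0).take k) ((pvWeights s1).take k)) (0, 0, [], []) := by
      refine PySem.List.foldl_congr_mem _ _ _ _ ?_
      intro acc i hi
      rw [PySem.List.mem_pyRange_neg_one] at hi
      simp only [pvSufStepA, pyGetD_take (pvWeights s0) k hk0 i (by omega) (by omega),
        pyGetD_take (pvWeights s1) k hk1 i (by omega) (by omega)]
    rw [hcP, hcS]
    have hv0l : ((pvWeights s0).take k).length = k := by simp; omega
    have hml : ((pvWeights s1).take k).length = ((pvWeights s0).take k).length := by
      simp; omega
    have hnn0 : ∀ x ∈ (pvWeights s0).take k, (0:Int) ≤ x :=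
      fun x hx => hnn s0 x (List.mem_of_mem_take hx)
    have hnn1 : ∀ x ∈ (pvWeights s1).take k, (0:Int) ≤ x :=
      fun x hx => hnn s1 x (List.mem_of_mem_take hx)
    rw [show (k : Int) = ((((pvWeights s0).take k).length : Nat) : Int) from by rw [hv0l]]
    rw [fwdA ((pvWeights s0).take k) ((pvWeights s1).take k) hnn0 hnn1
          ((pvWeights s0).take k).length le_rfl (by omega)]
    have hsuf := sufA ((pvWeights s0).take k) ((pvWeights s1).take k) hml hnn0 hnn1
      ((pvWeights s0).take k).length le_rfl
    have hdw1 : ((pvWeights s1).take k).drop ((pvWeights s0).take k).length = [] :=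
      List.drop_of_length_le (le_of_eq hml)
    simp only [List.drop_length, hdw1, List.reverse_nil, Nat.sub_self, List.range_zero,
      List.map_nil, fk_nil] at hsuf
    rw [hsuf]
    rw [gapA ((pvWeights s0).take k) ((pvWeights s1).take k)]
    rw [fk_nonneg _ (hnn s0), fk_nonneg _ (hnn s1)]
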